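-- pv_equiv track=rewrite | github.com/mateuszwroobel/DSA | kolokwia/Kolokwia_poprzednie/asd_kolokwia_2223/kolu-sort/kolu.py | ice_cream
-- ===== SOURCE A (Python) =====
-- def ice_cream(T):
--     T.sort(reverse=True)
--     time = 0
--     s = 0
--     for v in T:
--         if v - time >= 0:
--             s += v - time
--         else:
--             return s
--         time += 1
--     return s
-- ===== SOURCE B (Python) =====
-- def ice_cream(T):
--     T.sort(reverse=True)
--     # f(i) = T[i] - i is strictly decreasing on the sorted list, so the
--     # accepted elements form a prefix; binary-search its length.
--     lo, hi = 0, len(T)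
--     while lo < hi:
--         mid = (lo + hi) // 2
--         if T[mid] - mid >= 0:
--             lo = mid + 1
--         else:
--             hi = mid
--     return sum(T[:lo]) - lo * (lo - 1) // 2
-- ===== Notes on version B (the rewrite author's own statement) =====
-- stated objective: alternative
-- what changed: Replaces A's linear early-return scan after sorting with a binary search for the length L of the accepted prefix (T[i]-i is monotone decreasing on the descending-sorted list), then returns sum(T[:L]) minus the closed-form triangular number L*(L-1)//2 instead of accumulating v-time per element.
import Mathlib
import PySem

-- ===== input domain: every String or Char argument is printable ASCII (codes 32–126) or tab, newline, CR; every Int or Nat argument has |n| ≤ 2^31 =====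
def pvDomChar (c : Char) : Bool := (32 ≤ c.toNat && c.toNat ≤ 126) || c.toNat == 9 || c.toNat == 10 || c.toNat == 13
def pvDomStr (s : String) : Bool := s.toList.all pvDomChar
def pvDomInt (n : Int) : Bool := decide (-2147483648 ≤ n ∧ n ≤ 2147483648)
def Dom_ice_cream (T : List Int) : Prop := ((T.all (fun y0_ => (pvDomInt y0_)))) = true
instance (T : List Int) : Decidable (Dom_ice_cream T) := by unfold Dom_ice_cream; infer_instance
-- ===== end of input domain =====

-- B replaces A's linear early-return scan by a binary search for the accepted
-- prefix length plus a closed-form triangular sum (objective: alternative).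
-- Both A and B sort the argument list in place in Python; the equivalence
-- proved here is about the RETURN value (both perform the same mutation).

-- ===== PORT A =====
-- the for-loop of A: early return of s when v - time < 0
def pvIceLoop : List Int → Int → Int → Int
  | [], _, s => s
  | v :: rest, time, s =>
      if v - time ≥ 0 then pvIceLoop rest (time + 1) (s + (v - time)) else s

def ice_cream (T : List Int) : Int :=
  pvIceLoop (PySem.List.sorted T (fun x => x) true) 0 0

-- ===== PORT B =====
-- the while-loop of B; lo, hi stay in [0, len] so Nat and T[mid] is in range
-- (hence List.getD is exact for Python's T[mid] here); the fuel argument only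
-- makes the loop structurally total: hi - lo shrinks each step, so fuel =
-- initial gap is never exhausted
def pvBSearch (S : List Int) : Nat → Nat → Nat → Nat
  | 0, lo, _ => lo
  | fuel + 1, lo, hi =>
    if lo < hi then
      let mid := (lo + hi) / 2
      if S.getD mid 0 - (mid : Int) ≥ 0 then pvBSearch S fuel (mid + 1) hi
      else pvBSearch S fuel lo mid
    else lo

def ice_cream_alt (T : List Int) : Int :=
  let S := PySem.List.sorted T (fun x => x) true
  let L := pvBSearch S S.length 0 S.length
  (S.take L).sum - ((L * (L - 1) / 2 : Nat) : Int)

-- ===== PRECONDITION & SPEC =====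
def Spec_ice_cream (T : List Int) (out : Int) : Prop := out = ice_cream_alt T
instance (T : List Int) (out : Int) : Decidable (Spec_ice_cream T out) := by unfold Spec_ice_cream; infer_instance

-- ===== CLAIM (what is proved, stated in full; the proofs are below) =====
def Claim_equal_ice_cream : Prop := ∀ (T : List Int), Dom_ice_cream T → Spec_ice_cream T (ice_cream T)

-- ===== LEMMAS AND PROOFS =====

-- length of the prefix A's loop accepts, starting at time t
def pvTakeCount : List Int → Int → Nat
  | [], _ => 0
  | v :: r, t => if v - t ≥ 0 then pvTakeCount r (t + 1) + 1 else 0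

-- value A's loop adds to s, starting at time t
def pvSumPref : List Int → Int → Int
  | [], _ => 0
  | v :: r, t => if v - t ≥ 0 then (v - t) + pvSumPref r (t + 1) else 0

theorem pvIceLoop_eq (S : List Int) : ∀ (t s : Int), pvIceLoop S t s = s + pvSumPref S t := by
  induction S with
  | nil => intro t s; simp [pvIceLoop, pvSumPref]
  | cons v r ih =>
      intro t s
      simp only [pvIceLoop, pvSumPref]
      split_ifs with h
      · rw [ih]; ring
      · ring

theorem pvTakeCount_le (S : List Int) : ∀ (t : Int), pvTakeCount S t ≤ S.length := by
  induction S with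
  | nil => intro t; simp [pvTakeCount]
  | cons v r ih =>
      intro t
      simp only [pvTakeCount, List.length_cons]
      split_ifs with h
      · have := ih (t + 1); omega
      · omega

theorem pvTakeCount_pos (S : List Int) : ∀ (t : Int) (i : Nat), i < pvTakeCount S t →
    0 ≤ S.getD i 0 - (t + (i : Int)) := by
  induction S with
  | nil => intro t i h; simp [pvTakeCount] at h
  | cons v r ih =>
      intro t i h
      simp only [pvTakeCount] at h
      split_ifs at h with hv
      · cases i with
        | zero => simpa using hv
        | succ j =>
            have := ih (t + 1) j (by omega)
            simp only [List.getD_cons_succ]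
            push_cast
            push_cast at this
            linarith
      · omega

theorem pvTakeCount_neg (S : List Int) : ∀ (t : Int), pvTakeCount S t < S.length →
    S.getD (pvTakeCount S t) 0 - (t + (pvTakeCount S t : Int)) < 0 := by
  induction S with
  | nil => intro t h; simp at h
  | cons v r ih =>
      intro t h
      simp only [pvTakeCount, List.length_cons] at h ⊢
      split_ifs at h ⊢ with hv
      · have := ih (t + 1) (by omega)
        simp only [List.getD_cons_succ]
        push_cast
        push_cast at this
        linarith
      · simpa using hv

theorem pvSumPref_eq (S : List Int) : ∀ (t : Int),
    pvSumPref S t = (S.take (pvTakeCount S t)).sum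
      - ∑ i ∈ Finset.range (pvTakeCount S t), (t + (i : Int)) := by
  induction S with
  | nil => intro t; simp [pvSumPref, pvTakeCount]
  | cons v r ih =>
      intro t
      simp only [pvSumPref, pvTakeCount]
      split_ifs with hv
      · rw [ih (t + 1)]
        rw [Finset.sum_range_succ' (fun i => t + (i : Int))]
        simp only [List.take_succ_cons, List.sum_cons]
        push_cast
        have : (∑ i ∈ Finset.range (pvTakeCount r (t + 1)), (t + ((i : Int) + 1)))
            = ∑ i ∈ Finset.range (pvTakeCount r (t + 1)), ((t + 1) + (i : Int)) := by
          apply Finset.sum_congr rfl; intro i _; ring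
        rw [this]; ring
      · simp

-- binary-search correctness, by strong induction on the gap hi - lo
theorem pvBSearch_spec (S : List Int)
    (hmono : ∀ i j : Nat, i ≤ j → j < S.length →
      0 ≤ S.getD j 0 - (j : Int) → 0 ≤ S.getD i 0 - (i : Int)) :
    ∀ (n lo hi : Nat), hi - lo ≤ n → lo ≤ hi → hi ≤ S.length →
    (∀ i : Nat, i < lo → 0 ≤ S.getD i 0 - (i : Int)) →
    (∀ i : Nat, hi ≤ i → i < S.length → ¬ (0 ≤ S.getD i 0 - (i : Int))) →
    (∀ i : Nat, i < pvBSearch S n lo hi → 0 ≤ S.getD i 0 - (i : Int)) ∧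
    (∀ i : Nat, pvBSearch S n lo hi ≤ i → i < S.length → ¬ (0 ≤ S.getD i 0 - (i : Int))) ∧
    pvBSearch S n lo hi ≤ S.length := by
  intro n
  induction n with
  | zero =>
      intro lo hi hgap hlh hhl h1 h2
      have : lo = hi := by omega
      subst this
      exact ⟨h1, fun i hi' hl => h2 i hi' hl, hhl⟩
  | succ n ihn =>
      intro lo hi hgap hlh hhl h1 h2
      show (∀ i : Nat, i < pvBSearch S (n+1) lo hi → _) ∧ _
      rw [pvBSearch]
      by_cases hlt : lo < hi
      · simp only [hlt, if_true]
        set mid := (lo + hi) / 2 with hmid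
        have hml : lo ≤ mid := by omega
        have hmh : mid < hi := by omega
        by_cases hp : S.getD mid 0 - (mid : Int) ≥ 0
        · simp only [hp, if_true]
          apply ihn (mid + 1) hi (by omega) (by omega) hhl
          · intro i hi'
            exact hmono i mid (by omega) (by omega) hp
          · exact h2
        · simp only [hp, if_false]
          apply ihn lo mid (by omega) (by omega) (by omega) h1
          intro i hmi hil hpi
          exact hp (hmono mid i hmi hil hpi)
      · simp only [hlt, if_false]
        have : lo = hi := by omega
        subst this
        exact ⟨h1, fun i hi' hl => h2 i hi' hl, hhl⟩

-- uniqueness of the boundary index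
theorem pvBoundary_unique (S : List Int) (K L : Nat)
    (hK1 : ∀ i : Nat, i < K → 0 ≤ S.getD i 0 - (i : Int))
    (hK2 : K < S.length → S.getD K 0 - (K : Int) < 0)
    (hKl : K ≤ S.length)
    (hL1 : ∀ i : Nat, i < L → 0 ≤ S.getD i 0 - (i : Int))
    (hL2 : ∀ i : Nat, L ≤ i → i < S.length → ¬ (0 ≤ S.getD i 0 - (i : Int)))
    (hLl : L ≤ S.length) : K = L := by
  rcases lt_trichotomy K L with h | h | h
  · exact absurd (hL1 K h) (by have := hK2 (by omega); omega)
  · exact h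
  · exact absurd (hK1 L h) (hL2 L (le_refl L) (by omega))

theorem ice_cream_eq_alt (T : List Int) : ice_cream T = ice_cream_alt T := by
  unfold ice_cream ice_cream_alt
  set S := PySem.List.sorted T (fun x => x) true with hS
  have hpair : S.Pairwise (fun a b => b ≤ a) := PySem.List.sorted_pairwise_rev T (fun x => x) 
  have hmono : ∀ i j : Nat, i ≤ j → j < S.length →
      0 ≤ S.getD j 0 - (j : Int) → 0 ≤ S.getD i 0 - (i : Int) := by
    intro i j hij hjl hj
    rcases Nat.eq_or_lt_of_le hij with rfl | hlt
    · exact hj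
    · have hil : i < S.length := by omega
      have := (List.pairwise_iff_getElem.mp hpair) i j hil hjl hlt
      rw [List.getD_eq_getElem S 0 hil]
      rw [List.getD_eq_getElem S 0 hjl] at hj
      have : (S[j] : Int) ≤ S[i] := this
      have hji : (i : Int) ≤ (j : Int) := by exact_mod_cast hij
      linarith
  set K := pvTakeCount S 0 with hK
  set L := pvBSearch S S.length 0 S.length with hL
  obtain ⟨hL1, hL2, hLl⟩ := pvBSearch_spec S hmono S.length 0 S.length (by omega) (by omega)
    (le_refl _) (fun i h => absurd h (by omega)) (fun i h hl => absurd hl (by omega))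
  have hKL : K = L := by
    apply pvBoundary_unique S K L
    · intro i h
      have := pvTakeCount_pos S 0 i h
      simpa using this
    · intro h
      have := pvTakeCount_neg S 0 h
      simpa using this
    · exact pvTakeCount_le S 0
    · exact hL1
    · exact hL2
    · exact hLl
  rw [pvIceLoop_eq, pvSumPref_eq]
  simp only [← hK, hKL]
  have hsum : (∑ i ∈ Finset.range L, ((0 : Int) + (i : Int)))
      = ((L * (L - 1) / 2 : Nat) : Int) := by
    simp only [zero_add]
    rw [← Finset.sum_range_id L]
    push_cast
    rfl
  rw [hsum]
  ring

-- ===== VERDICT (by name: the statement is the Claim_ definition above) =====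
theorem ice_cream_spec : Claim_equal_ice_cream := by
  intro T _
  exact ice_cream_eq_alt T
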